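-- pv_equiv track=rewrite | github.com/nusu-github/WDTaggerAppend | src/wd_tagger_append/dataset_utils.py | apply_replacements_to_counts
-- ===== SOURCE A (Python) =====
-- from collections.abc import Callable, Collection, Iterable, Iterator, Mapping, Sequence
--
-- def apply_replacements_to_counts(
--     tag_counts: Mapping[str, int],
--     replacements: Mapping[str, str],
-- ) -> dict[str, int]:
--     """Map tag counts through replacement definitions."""
--     if not replacements:
--         return dict(tag_counts)
--
--     remapped: dict[str, int] = {}
--     for tag, count in tag_counts.items():
--         target = replacements.get(tag, tag)
--         remapped[target] = remapped.get(target, 0) + count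
--     return remapped
-- ===== SOURCE B (Python) =====
-- def apply_replacements_to_counts(tag_counts, replacements):
--     """Resolve every tag to its target up front, list the distinct targets in
--     first-encounter order, then build the result with one summing scan per target."""
--     pairs = [(replacements.get(tag, tag), count) for tag, count in tag_counts.items()]
--     order = []
--     for target, _ in pairs:
--         if target not in order:
--             order.append(target)
--     return {t: sum(c for tt, c in pairs if tt == t) for t in order}
-- ===== Notes on version B (the rewrite author's own statement) =====
-- stated objective: alternative
-- what changed: B abandons A's single accumulating dict: it materialises the resolved (target, count) pairs, derives the first-encounter order of distinct targets via list membership, and builds the result with a dict comprehension that does one summing scan over the pairs per distinct target (no running totals, no empty-replacements guard).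
import Mathlib
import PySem

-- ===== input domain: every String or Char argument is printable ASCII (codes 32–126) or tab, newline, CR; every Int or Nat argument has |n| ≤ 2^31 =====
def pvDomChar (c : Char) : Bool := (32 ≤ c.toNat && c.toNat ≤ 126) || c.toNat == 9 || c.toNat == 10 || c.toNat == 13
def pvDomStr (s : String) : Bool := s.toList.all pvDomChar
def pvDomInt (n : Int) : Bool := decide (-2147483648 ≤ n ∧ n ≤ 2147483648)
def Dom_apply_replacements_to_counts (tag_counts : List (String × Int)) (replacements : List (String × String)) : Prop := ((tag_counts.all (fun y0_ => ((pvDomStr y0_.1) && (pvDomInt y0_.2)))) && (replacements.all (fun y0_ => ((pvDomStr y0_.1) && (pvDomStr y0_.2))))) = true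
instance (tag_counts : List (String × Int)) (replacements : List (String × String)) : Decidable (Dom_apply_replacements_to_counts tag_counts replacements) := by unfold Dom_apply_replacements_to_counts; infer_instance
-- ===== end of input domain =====

-- B replaces A's accumulating dict by: resolve all targets, list distinct targets in
-- first-encounter order, then one summing scan per target (alternative decomposition, not faster).

-- ===== PORT A =====
def apply_replacements_to_counts (tag_counts : List (String × Int)) (replacements : List (String × String)) : List (String × Int) :=
  if replacements = [] then
    -- return dict(tag_counts)
    (tag_counts.foldl (fun d p => d.insert p.1 p.2) (PySem.Dict.empty : PySem.Dict String Int)).items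
  else
    -- remapped = {}; for tag, count in tag_counts.items(): ...
    (tag_counts.foldl (fun remapped p =>
        let target := (PySem.Dict.mk replacements).getD p.1 p.1
        remapped.insert target (remapped.getD target 0 + p.2))
      (PySem.Dict.empty : PySem.Dict String Int)).items

-- ===== PORT B =====
def apply_replacements_to_counts_alt (tag_counts : List (String × Int)) (replacements : List (String × String)) : List (String × Int) :=
  -- pairs = [(replacements.get(tag, tag), count) for tag, count in tag_counts.items()]
  let pairs := tag_counts.map (fun p => ((PySem.Dict.mk replacements).getD p.1 p.1, p.2))
  -- order = []; for target, _ in pairs: if target not in order: order.append(target)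
  let order := pairs.foldl (fun o q => if q.1 ∈ o then o else o ++ [q.1]) []
  -- {t: sum(c for tt, c in pairs if tt == t) for t in order}  (keys of order are distinct,
  -- so the comprehension's dict is exactly this association list in that order)
  order.map (fun t => (t, pairs.foldl (fun s q => if q.1 == t then s + q.2 else s) 0))

-- ===== PRECONDITION & SPEC =====
-- Pre_ excludes tag_counts lists with duplicate keys: tag_counts is a Python dict, whose keys are
-- necessarily distinct, so a duplicate-keyed association list does not correspond to any Python input.
def Pre_apply_replacements_to_counts (tag_counts : List (String × Int)) (replacements : List (String × String)) : Prop :=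
  (tag_counts.map Prod.fst).Nodup
instance (tag_counts : List (String × Int)) (replacements : List (String × String)) : Decidable (Pre_apply_replacements_to_counts tag_counts replacements) := by unfold Pre_apply_replacements_to_counts; infer_instance
def pvWitness_apply_replacements_to_counts : (List (String × Int)) × (List (String × String)) :=
  ([("cat", 3), ("dog", 2)], [("cat", "feline")])

def Spec_apply_replacements_to_counts (tag_counts : List (String × Int)) (replacements : List (String × String)) (out : List (String × Int)) : Prop := out = apply_replacements_to_counts_alt tag_counts replacements
instance (tag_counts : List (String × Int)) (replacements : List (String × String)) (out : List (String × Int)) : Decidable (Spec_apply_replacements_to_counts tag_counts replacements out) := by unfold Spec_apply_replacements_to_counts; infer_instance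

-- ===== CLAIM (what is proved, stated in full; the proofs are below) =====
def Claim_equal_apply_replacements_to_counts : Prop := ∀ (tag_counts : List (String × Int)) (replacements : List (String × String)), Dom_apply_replacements_to_counts tag_counts replacements → Pre_apply_replacements_to_counts tag_counts replacements → Spec_apply_replacements_to_counts tag_counts replacements (apply_replacements_to_counts tag_counts replacements)

-- ===== LEMMAS AND PROOFS =====

-- first-encounter order of the keys of l
def pvOrd (l : List (String × Int)) : List String :=
  l.foldl (fun o q => if q.1 ∈ o then o else o ++ [q.1]) []

-- total count attached to key t in l
def pvSum (t : String) (l : List (String × Int)) : Int :=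
  l.foldl (fun s q => if q.1 == t then s + q.2 else s) 0

theorem pvOrd_append (l : List (String × Int)) (q : String × Int) :
    pvOrd (l ++ [q]) = if q.1 ∈ pvOrd l then pvOrd l else pvOrd l ++ [q.1] := by
  simp [pvOrd, List.foldl_append]

theorem pvMem_ord (l : List (String × Int)) (t : String) :
    t ∈ pvOrd l ↔ t ∈ l.map Prod.fst := by
  induction l using List.reverseRecOn with
  | nil => simp [pvOrd]
  | append_singleton l q ih =>
    rw [pvOrd_append]
    by_cases h : q.1 ∈ pvOrd l
    · rw [if_pos h, ih]
      simp only [List.map_append, List.map_cons, List.map_nil, List.mem_append, List.mem_singleton]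
      constructor
      · exact Or.inl
      · rintro (hm | rfl)
        · exact hm
        · exact ih.mp h
    · rw [if_neg h]
      simp only [List.mem_append, List.mem_singleton, List.map_append, List.map_cons,
        List.map_nil, ih]

theorem pvSum_append (l : List (String × Int)) (q : String × Int) (t : String) :
    pvSum t (l ++ [q]) = pvSum t l + (if q.1 == t then q.2 else 0) := by
  simp only [pvSum, List.foldl_append, List.foldl_cons, List.foldl_nil]
  split <;> simp

theorem pvSum_zero (l : List (String × Int)) (t : String) (h : t ∉ l.map Prod.fst) :
    pvSum t l = 0 := by
  induction l using List.reverseRecOn with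
  | nil => rfl
  | append_singleton l q ih =>
    simp only [List.map_append, List.map_cons, List.map_nil] at h
    rw [pvSum_append, if_neg (by simpa using fun hq : q.1 = t => h (by simp [hq])),
        ih (fun hm => h (List.mem_append_left _ hm))]
    simp

theorem pvGet_mk_map (ord : List String) (f : String → Int) (t : String) :
    (PySem.Dict.mk (ord.map (fun u => (u, f u)))).get? t
      = if t ∈ ord then some (f t) else none := by
  induction ord with
  | nil => simp [PySem.Dict.get?]
  | cons u ord ih =>
    by_cases h : u = t
    · subst h; simp [PySem.Dict.get?_mk_cons]
    · simp [PySem.Dict.get?_mk_cons, h, ih, Ne.symm h]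

-- A's accumulation over an arbitrary key-count list is exactly B's order-then-sum description
theorem pvInv (l : List (String × Int)) :
    l.foldl (fun d q => d.insert q.1 (d.getD q.1 0 + q.2)) (PySem.Dict.empty : PySem.Dict String Int)
      = PySem.Dict.mk ((pvOrd l).map (fun t => (t, pvSum t l))) := by
  induction l using List.reverseRecOn with
  | nil => rfl
  | append_singleton l q ih =>
    rw [List.foldl_append, List.foldl_cons, List.foldl_nil, ih]
    have hget := pvGet_mk_map (pvOrd l) (fun t => pvSum t l) q.1
    by_cases h : q.1 ∈ pvOrd l
    · rw [if_pos h] at hget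
      have hcont : (PySem.Dict.mk ((pvOrd l).map (fun t => (t, pvSum t l)))).contains q.1 = true := by
        rw [PySem.Dict.contains_eq_isSome_get?, hget]; rfl
      have hgd : (PySem.Dict.mk ((pvOrd l).map (fun t => (t, pvSum t l)))).getD q.1 0 = pvSum q.1 l := by
        rw [PySem.Dict.getD_eq_get?_getD, hget]; rfl
      apply PySem.Dict.ext
      rw [PySem.Dict.items_insert_of_contains _ _ hcont, hgd, pvOrd_append, if_pos h]
      show (((pvOrd l).map (fun t => (t, pvSum t l))).map _) = _
      rw [List.map_map]
      apply List.map_congr_left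
      intro t _
      by_cases ht : t = q.1
      · subst ht; simp [Function.comp, pvSum_append]
      · simp [Function.comp, pvSum_append, ht,
              show (q.1 == t) = false from beq_eq_false_iff_ne.mpr (Ne.symm ht)]
    · rw [if_neg h] at hget
      have hcont : (PySem.Dict.mk ((pvOrd l).map (fun t => (t, pvSum t l)))).contains q.1 = false := by
        rw [PySem.Dict.contains_eq_isSome_get?, hget]; rfl
      have hgd : (PySem.Dict.mk ((pvOrd l).map (fun t => (t, pvSum t l)))).getD q.1 0 = 0 :=
        PySem.Dict.getD_of_not_contains _ _ hcont
      apply PySem.Dict.ext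
      rw [PySem.Dict.items_insert_of_not_contains _ _ hcont, hgd, pvOrd_append, if_neg h]
      show (((pvOrd l).map (fun t => (t, pvSum t l)))) ++ _ = _
      rw [List.map_append]
      congr 1
      · apply List.map_congr_left
        intro t htm
        have hne : q.1 ≠ t := fun he => h (he ▸ htm)
        simp [pvSum_append, beq_eq_false_iff_ne.mpr hne]
      · have hz : pvSum q.1 l = 0 := pvSum_zero l q.1 (fun hm => h ((pvMem_ord l q.1).mpr hm))
        simp [pvSum_append, hz]

-- with distinct keys, order-then-sum reconstructs the list itself
theorem pvNodup_id (l : List (String × Int)) (hnd : (l.map Prod.fst).Nodup) :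
    (pvOrd l).map (fun t => (t, pvSum t l)) = l := by
  induction l using List.reverseRecOn with
  | nil => rfl
  | append_singleton l q ih =>
    simp only [List.map_append, List.map_cons, List.map_nil] at hnd
    have hnd' : (l.map Prod.fst).Nodup := (List.nodup_append.mp hnd).1
    have hnew : q.1 ∉ l.map Prod.fst := fun hm =>
      (List.nodup_append.mp hnd).2.2 q.1 hm q.1 (by simp) rfl
    have hno : q.1 ∉ pvOrd l := fun hm => hnew ((pvMem_ord l q.1).mp hm)
    rw [pvOrd_append, if_neg hno, List.map_append]
    have hc : (pvOrd l).map (fun t => (t, pvSum t (l ++ [q])))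
        = (pvOrd l).map (fun t => (t, pvSum t l)) := by
      apply List.map_congr_left
      intro t htm
      have hne : q.1 ≠ t := fun he => hno (he ▸ htm)
      simp [pvSum_append, beq_eq_false_iff_ne.mpr hne]
    rw [hc, ih hnd']
    have hz : pvSum q.1 l = 0 := pvSum_zero l q.1 hnew
    simp [pvSum_append, hz]

-- dict(tag_counts) with distinct keys is tag_counts itself
theorem pvDictFresh (tc : List (String × Int)) (hnd : (tc.map Prod.fst).Nodup) :
    (tc.foldl (fun d p => d.insert p.1 p.2) (PySem.Dict.empty : PySem.Dict String Int)).items = tc := by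
  have hfresh : ∀ a ∈ tc, (PySem.Dict.empty : PySem.Dict String Int).contains a.1 = false := by
    intro a _; simp
  have h := PySem.Dict.items_foldl_insert_fresh tc Prod.fst Prod.snd PySem.Dict.empty hfresh hnd
  simpa using h

-- ===== VERDICT (by name: the statement is the Claim_ definition above) =====
theorem apply_replacements_to_counts_spec : Claim_equal_apply_replacements_to_counts := by
  intro tc rs _ hpre
  unfold Spec_apply_replacements_to_counts apply_replacements_to_counts
  have halt : apply_replacements_to_counts_alt tc rs
      = (pvOrd (tc.map (fun p => ((PySem.Dict.mk rs).getD p.1 p.1, p.2)))).map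
          (fun t => (t, pvSum t (tc.map (fun p => ((PySem.Dict.mk rs).getD p.1 p.1, p.2))))) := rfl
  by_cases h : rs = []
  · subst h
    have hpairs : tc.map (fun p => ((PySem.Dict.mk ([] : List (String × String))).getD p.1 p.1, p.2)) = tc := by
      have he : ∀ p : String × Int, ((PySem.Dict.mk ([] : List (String × String))).getD p.1 p.1, p.2) = p := by
        intro p; simp [PySem.Dict.getD_eq_get?_getD, PySem.Dict.get?]
      simp [he]
    rw [if_pos rfl, pvDictFresh tc hpre, halt, hpairs]
    exact (pvNodup_id tc hpre).symm
  · have hfold : (tc.foldl (fun remapped p =>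
        let target := (PySem.Dict.mk rs).getD p.1 p.1
        remapped.insert target (remapped.getD target 0 + p.2))
        (PySem.Dict.empty : PySem.Dict String Int))
        = (tc.map (fun p => ((PySem.Dict.mk rs).getD p.1 p.1, p.2))).foldl
            (fun d q => d.insert q.1 (d.getD q.1 0 + q.2)) (PySem.Dict.empty : PySem.Dict String Int) := by
      rw [List.foldl_map]
    rw [if_neg h, halt, hfold, pvInv]
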